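-- pv_equiv track=rewrite | github.com/TheBrunno/Macaco-Flamejante-Theorem | main.py | mmc
-- ===== SOURCE A (Python) =====
-- def mmc(first, second):
--   bigger = smaller = 0
--   mm = True
--   firstIsBigger = False
--   if int(first) > int(second):
--     bigger = int(first)
--     smaller = int(second)
--     firstIsBigger = True
--   else:
--     bigger = int(second)
--     smaller = int(first)
--
--   while True:
--     if mm:
--       mm = False
--       for c in range(smaller, 1, -1):
--         if smaller % c == 0 and bigger % c == 0:
--           smaller = int(smaller / c)
--           bigger = int(bigger / c)
--           mm = True
--       if not mm:
--         break
--
--   if firstIsBigger: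
--     return bigger, smaller
--   else:
--     return smaller, bigger
-- ===== SOURCE B (Python) =====
-- def mmc(first, second):
--     a, b = int(first), int(second)
--     if min(a, b) < 2:
--         return a, b
--     x, y = a, b
--     while y:
--         x, y = y, x % y
--     return a // x, b // x
-- ===== Notes on version B (the rewrite author's own statement) =====
-- stated objective: faster
-- what changed: Replaced A's repeated descending divisor scan (re-scanning all candidates from the smaller number down to 2 until a fixpoint) with one explicit Euclidean-algorithm loop computing the gcd, then a single division of each argument; the min<2 guard preserves A's unchanged return for zero, one and negatives.
import Mathlib
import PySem

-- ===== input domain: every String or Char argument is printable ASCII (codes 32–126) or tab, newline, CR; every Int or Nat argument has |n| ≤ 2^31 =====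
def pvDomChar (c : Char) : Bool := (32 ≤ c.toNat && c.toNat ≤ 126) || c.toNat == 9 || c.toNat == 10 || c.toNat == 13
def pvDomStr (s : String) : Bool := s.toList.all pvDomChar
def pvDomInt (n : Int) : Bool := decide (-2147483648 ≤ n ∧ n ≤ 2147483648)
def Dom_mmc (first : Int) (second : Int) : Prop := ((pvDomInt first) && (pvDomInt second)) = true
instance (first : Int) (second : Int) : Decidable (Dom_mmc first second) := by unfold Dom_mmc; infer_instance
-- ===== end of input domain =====

-- B replaces A's repeated descending common-divisor scan by one Euclidean gcd loop and a single
-- division; the min<2 guard keeps A's unchanged return for zero/one/negative inputs.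

-- ===== PORT A =====
-- state = (bigger, smaller, mm); one step of the inner 'for c in range(smaller, 1, -1)' loop.
-- int(smaller / c) is float true division truncated: PySem.Int.truncdiv is its exact port on the domain.
def mmcStep (st : Int × Int × Bool) (c : Int) : Int × Int × Bool :=
  if PySem.Int.mod st.2.1 c == 0 && PySem.Int.mod st.1 c == 0 then
    (PySem.Int.truncdiv st.1 c, PySem.Int.truncdiv st.2.1 c, true)
  else st

-- one body of the outer while (mm = False; the for-loop over the range captured at entry)
def mmcPass (bigger smaller : Int) : Int × Int × Bool :=
  (PySem.List.pyRange smaller 1 (-1)).foldl mmcStep (bigger, smaller, false)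

-- the 'while True' loop; fuel is a totality guard only — smaller strictly decreases on every
-- repeated pass, so fuel smaller.toNat + 1 is never exhausted (proved below)
def mmcWhile : Nat → Int → Int → Int × Int
  | 0, b, s => (b, s)
  | fuel + 1, b, s =>
      match mmcPass b s with
      | (b', s', mm) => if mm then mmcWhile fuel b' s' else (b', s')

def mmc (first : Int) (second : Int) : List Int :=
  if first > second then
    let r := mmcWhile (second.toNat + 1) first second
    [r.1, r.2]
  else
    let r := mmcWhile (first.toNat + 1) second first
    [r.2, r.1]

-- ===== PORT B =====
-- needed by euclid's termination proof (cited in decreasing_by)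
theorem pymod_natAbs_lt (x y : Int) (h : y ≠ 0) : (PySem.Int.mod x y).natAbs < y.natAbs := by
  rcases lt_or_gt_of_ne h with hneg | hpos
  · have hb := PySem.Int.mod_neg_bounds x hneg
    omega
  · have h1 := PySem.Int.mod_nonneg x hpos
    have h2 := PySem.Int.mod_lt x hpos
    omega

-- the Python loop 'x, y = a, b; while y: x, y = y, x % y'
def euclid (x y : Int) : Int :=
  if h : y = 0 then x else euclid y (PySem.Int.mod x y)
termination_by y.natAbs
decreasing_by exact pymod_natAbs_lt x y h

def mmc_alt (first : Int) (second : Int) : List Int :=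
  if min first second < 2 then [first, second]
  else
    let x := euclid first second
    [PySem.Int.floordiv first x, PySem.Int.floordiv second x]

-- ===== PRECONDITION & SPEC =====
def Spec_mmc (first : Int) (second : Int) (out : List Int) : Prop := out = mmc_alt first second
instance (first : Int) (second : Int) (out : List Int) : Decidable (Spec_mmc first second out) := by unfold Spec_mmc; infer_instance

-- ===== CLAIM (what is proved, stated in full; the proofs are below) =====
def Claim_equal_mmc : Prop := ∀ (first : Int) (second : Int), Dom_mmc first second → Spec_mmc first second (mmc first second)

-- ===== LEMMAS AND PROOFS =====

-- loop invariant of A's reduction: both components positive, smaller divides its start value,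
-- and the cross-ratio with the start pair is preserved (both get divided by the same factors)
def MmcInv (b0 s0 b s : Int) : Prop := 0 < s ∧ 0 < b ∧ s ∣ s0 ∧ s0 * b = b0 * s

theorem gcd_emod (a b : Int) : Int.gcd b (a % b) = Int.gcd a b := by
  apply Nat.dvd_antisymm
  · apply Int.dvd_gcd
    · have h1 : (↑(Int.gcd b (a % b)) : Int) ∣ b := Int.gcd_dvd_left _ _
      have h2 : (↑(Int.gcd b (a % b)) : Int) ∣ a % b := Int.gcd_dvd_right _ _
      have h := dvd_add h2 (h1.mul_right (a / b))
      rwa [Int.emod_add_mul_ediv] at h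
    · exact Int.gcd_dvd_left _ _
  · apply Int.dvd_gcd
    · exact Int.gcd_dvd_right _ _
    · have h1 : (↑(Int.gcd a b) : Int) ∣ a := Int.gcd_dvd_left _ _
      have h2 : (↑(Int.gcd a b) : Int) ∣ b := Int.gcd_dvd_right _ _
      rw [Int.emod_def]; exact dvd_sub h1 (h2.mul_right _)

-- B's Euclid loop computes the (nonnegative) gcd on nonnegative inputs
theorem euclid_eq_gcd (x y : Int) (hx : 0 ≤ x) (hy : 0 ≤ y) : euclid x y = ↑(Int.gcd x y) := by
  by_cases h : y = 0
  · subst h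
    rw [euclid]
    simp [Int.gcd, Int.natAbs_of_nonneg hx]
  · have hypos : 0 < y := lt_of_le_of_ne hy (Ne.symm h)
    have hmod : PySem.Int.mod x y = x % y := PySem.Int.mod_eq_emod_of_pos hypos
    rw [euclid]
    simp only [h, dite_false]
    rw [hmod]
    rw [euclid_eq_gcd y (x % y) hy (Int.emod_nonneg x h), gcd_emod]
termination_by y.natAbs
decreasing_by
  have h' := pymod_natAbs_lt x y h
  omega

-- one fold over any list of candidates ≥ 2 preserves the invariant; smaller never increases,
-- and either nothing at all happened or the flag came out true and smaller strictly shrank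
theorem mmcFold_inv (b0 s0 : Int) (cs : List Int) :
    ∀ (b s : Int) (mm : Bool), (∀ c ∈ cs, 2 ≤ c) → MmcInv b0 s0 b s →
    MmcInv b0 s0 (cs.foldl mmcStep (b, s, mm)).1 (cs.foldl mmcStep (b, s, mm)).2.1 ∧
    (cs.foldl mmcStep (b, s, mm)).2.1 ≤ s ∧
    ((cs.foldl mmcStep (b, s, mm)) = (b, s, mm) ∨
      ((cs.foldl mmcStep (b, s, mm)).2.2 = true ∧ (cs.foldl mmcStep (b, s, mm)).2.1 < s)) := by
  induction cs with
  | nil => intro b s mm _ h; exact ⟨h, le_refl _, Or.inl rfl⟩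
  | cons c cs ih =>
    intro b s mm hcs h
    obtain ⟨hs, hb, hdvd, hcross⟩ := h
    have hc : 2 ≤ c := hcs c List.mem_cons_self
    have hcs' : ∀ c ∈ cs, 2 ≤ c := fun c hc => hcs c (List.mem_cons_of_mem _ hc)
    simp only [List.foldl_cons]
    by_cases hdiv : (PySem.Int.mod s c == 0 && PySem.Int.mod b c == 0) = true
    · -- c divides both: divide both, flag true
      rw [Bool.and_eq_true, beq_iff_eq, beq_iff_eq] at hdiv
      have hds : c ∣ s := (PySem.Int.mod_eq_zero_iff_dvd s c).mp hdiv.1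
      have hdb : c ∣ b := (PySem.Int.mod_eq_zero_iff_dvd b c).mp hdiv.2
      have hcpos : (0:Int) < c := by omega
      have hstep : mmcStep (b, s, mm) c = (b / c, s / c, true) := by
        simp only [mmcStep, hdiv.1, hdiv.2]
        simp [Int.tdiv_eq_ediv_of_dvd hdb, Int.tdiv_eq_ediv_of_dvd hds, PySem.Int.truncdiv]
      rw [hstep]
      have hs' : 0 < s / c := Int.ediv_pos_of_pos_of_dvd hs (le_of_lt hcpos) hds
      have hb' : 0 < b / c := Int.ediv_pos_of_pos_of_dvd hb (le_of_lt hcpos) hdb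
      have hsdvd : s / c ∣ s := Int.ediv_dvd_of_dvd hds
      have hcross' : s0 * (b / c) = b0 * (s / c) := by
        apply mul_left_cancel₀ (show c ≠ 0 by omega)
        calc c * (s0 * (b / c)) = s0 * (c * (b / c)) := by ring
        _ = s0 * b := by rw [Int.mul_ediv_cancel' hdb]
        _ = b0 * s := hcross
        _ = b0 * (c * (s / c)) := by rw [Int.mul_ediv_cancel' hds]
        _ = c * (b0 * (s / c)) := by ring
      have hlt : s / c < s := by
        apply Int.ediv_lt_of_lt_mul hcpos
        nlinarith
      obtain ⟨ihInv, ihle, ihcase⟩ := ih (b / c) (s / c) true hcs' ⟨hs', hb', hsdvd.trans hdvd, hcross'⟩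
      refine ⟨ihInv, le_trans ihle (le_of_lt hlt), Or.inr ?_⟩
      rcases ihcase with hsame | ⟨hflag, _⟩
      · rw [hsame]; exact ⟨rfl, hlt⟩
      · exact ⟨hflag, lt_of_le_of_lt ihle hlt⟩
    · -- the test fails: nothing changes
      have hstep : mmcStep (b, s, mm) c = (b, s, mm) := by
        simp only [mmcStep]
        rw [if_neg hdiv]
      rw [hstep]
      exact ih b s mm hcs' ⟨hs, hb, hdvd, hcross⟩

-- if the flag comes out false (starting false), no candidate divided both numbers
theorem mmcFold_noChange (cs : List Int) :
    ∀ (b s : Int), (cs.foldl mmcStep (b, s, false)).2.2 = false →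
    ∀ c ∈ cs, ¬(c ∣ s ∧ c ∣ b) := by
  induction cs with
  | nil => intro b s _ c hc; cases hc
  | cons c cs ih =>
    intro b s hfalse c' hc'
    by_cases hdiv : (PySem.Int.mod s c == 0 && PySem.Int.mod b c == 0) = true
    · exfalso
      have hstep : mmcStep (b, s, false) c
          = (PySem.Int.truncdiv b c, PySem.Int.truncdiv s c, true) := by
        simp only [mmcStep]
        rw [if_pos hdiv]
      rw [List.foldl_cons, hstep] at hfalse
      -- the flag, once true, stays true
      have htrue : ∀ (ds : List Int) (b s : Int), (ds.foldl mmcStep (b, s, true)).2.2 = true := by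
        intro ds
        induction ds with
        | nil => intro _ _; rfl
        | cons d ds ihd =>
          intro b s
          simp only [List.foldl_cons, mmcStep]
          split_ifs <;> exact ihd _ _
      rw [htrue] at hfalse; cases hfalse
    · have hstep : mmcStep (b, s, false) c = (b, s, false) := by
        simp only [mmcStep]
        rw [if_neg hdiv]
      rw [List.foldl_cons, hstep] at hfalse
      rcases List.mem_cons.mp hc' with h | h
      · subst h
        intro ⟨h1, h2⟩
        rw [Bool.and_eq_true, beq_iff_eq, beq_iff_eq] at hdiv
        exact hdiv ⟨(PySem.Int.mod_eq_zero_iff_dvd s c').mpr h1,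
                    (PySem.Int.mod_eq_zero_iff_dvd b c').mpr h2⟩
      · exact ih b s hfalse c' h

-- the fixpoint of A's outer loop: invariant holds and the final pair is coprime
theorem mmcWhile_spec (b0 s0 : Int) :
    ∀ (fuel : Nat) (b s : Int), MmcInv b0 s0 b s → s.toNat < fuel →
    MmcInv b0 s0 (mmcWhile fuel b s).1 (mmcWhile fuel b s).2 ∧
    Int.gcd (mmcWhile fuel b s).2 (mmcWhile fuel b s).1 = 1 := by
  intro fuel
  induction fuel with
  | zero => intro b s h hf; obtain ⟨hs, -, -, -⟩ := h; omega
  | succ n ih =>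
    intro b s hinv hfuel
    have hcs : ∀ c ∈ PySem.List.pyRange s 1 (-1), 2 ≤ c := by
      intro c hc
      have := PySem.List.mem_pyRange_neg_one.mp hc
      omega
    rcases hF : mmcPass b s with ⟨b', s', mm'⟩
    obtain ⟨foldInv, foldle, foldcase⟩ := mmcFold_inv b0 s0 _ b s false hcs hinv
    have hF' : (PySem.List.pyRange s 1 (-1)).foldl mmcStep (b, s, false) = (b', s', mm') := hF
    rw [hF'] at foldInv foldle foldcase
    rw [mmcWhile, hF]
    cases mm' with
    | false =>
      -- fixpoint: state unchanged, every candidate 2..s fails, hence the pair is coprime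
      rcases foldcase with hsame | ⟨hflag, _⟩
      · injection hsame with h1 hrest
        injection hrest with h2 h3
        simp only [Bool.false_eq_true, if_false]
        rw [h1, h2]
        refine ⟨hinv, ?_⟩
        obtain ⟨hs, hb, -, -⟩ := hinv
        have hnone : ∀ c ∈ PySem.List.pyRange s 1 (-1), ¬(c ∣ s ∧ c ∣ b) := by
          apply mmcFold_noChange
          rw [hF']
        by_contra hne
        have hg1 : 0 < Int.gcd s b := Int.gcd_pos_of_ne_zero_left b (by omega)
        have hg2 : 2 ≤ (Int.gcd s b : Int) := by
          have : Int.gcd s b ≠ 1 := hne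
          omega
        have hgdvds : (↑(Int.gcd s b) : Int) ∣ s := Int.gcd_dvd_left _ _
        have hgdvdb : (↑(Int.gcd s b) : Int) ∣ b := Int.gcd_dvd_right _ _
        have hgle : (↑(Int.gcd s b) : Int) ≤ s := Int.le_of_dvd hs hgdvds
        exact hnone _ (PySem.List.mem_pyRange_neg_one.mpr (by omega)) ⟨hgdvds, hgdvdb⟩
      · cases hflag
    | true =>
      -- something changed: recurse with a strictly smaller 'smaller'
      have hlt : s' < s := by
        rcases foldcase with hsame | ⟨-, hlt⟩
        · injection hsame with h1 hrest
          injection hrest with h2 h3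
          cases h3
        · exact hlt
      have hs' : 0 < s' := foldInv.1
      simp only [if_true]
      exact ih b' s' foldInv (by omega)

-- the invariant plus coprimality pins the result down: it is the pair divided by the gcd
theorem mmc_unique (b0 s0 b s : Int) (hs0 : 0 < s0) (hb0 : 0 < b0)
    (hinv : MmcInv b0 s0 b s) (hcop : Int.gcd s b = 1) :
    s = s0 / ↑(Int.gcd s0 b0) ∧ b = b0 / ↑(Int.gcd s0 b0) := by
  obtain ⟨hs, hb, ⟨q, hq⟩, hcross⟩ := hinv
  have hqpos : 0 < q := by nlinarith
  have hb0eq : b0 = q * b := by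
    apply mul_left_cancel₀ (ne_of_gt hs)
    rw [hq] at hcross
    nlinarith [hcross]
  have hgcd : Int.gcd s0 b0 = q.natAbs := by
    rw [hq, hb0eq, show s * q = q * s by ring, Int.gcd_mul_left, hcop, mul_one]
  have hqcast : (↑(Int.gcd s0 b0) : Int) = q := by
    rw [hgcd]; exact Int.natAbs_of_nonneg (le_of_lt hqpos)
  constructor
  · rw [hqcast, hq, Int.mul_ediv_cancel _ (ne_of_gt hqpos)]
  · rw [hqcast, hb0eq, Int.mul_ediv_cancel_left _ (ne_of_gt hqpos)]

-- when smaller < 2, the range is empty and A's loop returns its input unchanged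
theorem mmcWhile_small (fuel : Nat) (b s : Int) (hs : s < 2) (hfuel : 0 < fuel) :
    mmcWhile fuel b s = (b, s) := by
  cases fuel with
  | zero => omega
  | succ n =>
    have hpass : mmcPass b s = (b, s, false) := by
      unfold mmcPass
      rw [PySem.List.pyRange_neg_one_eq_nil (by omega)]
      rfl
    rw [mmcWhile, hpass]
    rfl

-- full reduction: A's loop result when both numbers are ≥ 2
theorem mmcWhile_reduces (b0 s0 : Int) (hs0 : 0 < s0) (hb0 : 0 < b0) :
    mmcWhile (s0.toNat + 1) b0 s0
      = (b0 / ↑(Int.gcd s0 b0), s0 / ↑(Int.gcd s0 b0)) := by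
  have hinv : MmcInv b0 s0 b0 s0 := ⟨hs0, hb0, dvd_refl _, mul_comm s0 b0⟩
  obtain ⟨hinv', hcop⟩ := mmcWhile_spec b0 s0 (s0.toNat + 1) b0 s0 hinv (by omega)
  obtain ⟨h1, h2⟩ := mmc_unique b0 s0 _ _ hs0 hb0 hinv' hcop
  exact Prod.ext h2 h1

theorem mmc_eq_alt (f s : Int) : mmc f s = mmc_alt f s := by
  by_cases hmin : min f s < 2
  · -- no reduction on either side
    rw [mmc_alt, if_pos hmin, mmc]
    by_cases hgt : f > s
    · rw [if_pos hgt, mmcWhile_small _ _ _ (by omega) (by omega)]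
    · rw [if_neg hgt, mmcWhile_small _ _ _ (by omega) (by omega)]
  · -- both ≥ 2: A divides out the gcd, B computes it by Euclid and divides once
    have hf : 2 ≤ f := by omega
    have hs : 2 ≤ s := by omega
    have hg : 0 < Int.gcd f s := Int.gcd_pos_of_ne_zero_left s (by omega)
    rw [mmc_alt, if_neg hmin]
    simp only [euclid_eq_gcd f s (by omega) (by omega),
      PySem.Int.floordiv_eq_ediv_of_pos (show (0:Int) < ↑(Int.gcd f s) by exact_mod_cast hg)]
    rw [mmc]
    by_cases hgt : f > s
    · rw [if_pos hgt, mmcWhile_reduces f s (by omega) (by omega)]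
      rw [Int.gcd_comm s f]
    · rw [if_neg hgt, mmcWhile_reduces s f (by omega) (by omega)]

-- ===== VERDICT (by name: the statement is the Claim_ definition above) =====
theorem mmc_spec : Claim_equal_mmc := by
  intro f s _
  show mmc f s = mmc_alt f s
  exact mmc_eq_alt f s
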